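-- pv_equiv track=rewrite | github.com/harshshekhar24/LabGroup3PADSCelonis | algorithms/emma/phase3_episode_mining.py | temporal_join
-- ===== SOURCE A (Python) =====
-- def temporal_join(episode_boundlist, f_boundlist, maxwin):
--     new_boundlist = []
--     for ts_i, te_i in episode_boundlist:
--         window_end = ts_i + maxwin - 1
--         for ts_f, _ in f_boundlist:
--             if te_i < ts_f <= window_end:
--                 new_boundlist.append((ts_i, ts_f))
--     return new_boundlist
-- ===== SOURCE B (Python) =====
-- def _upper_bound(a, x):
--     # first index lo with a[lo] > x, for a sorted ascending
--     lo, hi = 0, len(a)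
--     while lo < hi:
--         mid = (lo + hi) // 2
--         if a[mid] <= x:
--             lo = mid + 1
--         else:
--             hi = mid
--     return lo
--
--
-- def temporal_join(episode_boundlist, f_boundlist, maxwin):
--     # Pre-sort the f start-timestamps (tagged with their original positions) once,
--     # then binary-search the contiguous (te_i, ts_i + maxwin - 1] range per episode
--     # and re-emit the hits in original f order.
--     tagged = sorted([(ts_f, j) for j, (ts_f, _) in enumerate(f_boundlist)],
--                     key=lambda p: p[0])
--     keys = [p[0] for p in tagged]
--     out = []
--     for ts_i, te_i in episode_boundlist:
--         lo = _upper_bound(keys, te_i)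
--         hi = _upper_bound(keys, ts_i + maxwin - 1)
--         for ts_f, _ in sorted(tagged[lo:hi], key=lambda p: p[1]):
--             out.append((ts_i, ts_f))
--     return out
-- ===== Notes on version B (the rewrite author's own statement) =====
-- stated objective: alternative
-- what changed: B pre-sorts the f start-timestamps once (tagged with positions) and binary-searches the contiguous (te_i, ts_i+maxwin-1] range per episode instead of scanning all of f_boundlist for every episode; it trades the inner scan for sorting plus two binary searches per episode.
import Mathlib
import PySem

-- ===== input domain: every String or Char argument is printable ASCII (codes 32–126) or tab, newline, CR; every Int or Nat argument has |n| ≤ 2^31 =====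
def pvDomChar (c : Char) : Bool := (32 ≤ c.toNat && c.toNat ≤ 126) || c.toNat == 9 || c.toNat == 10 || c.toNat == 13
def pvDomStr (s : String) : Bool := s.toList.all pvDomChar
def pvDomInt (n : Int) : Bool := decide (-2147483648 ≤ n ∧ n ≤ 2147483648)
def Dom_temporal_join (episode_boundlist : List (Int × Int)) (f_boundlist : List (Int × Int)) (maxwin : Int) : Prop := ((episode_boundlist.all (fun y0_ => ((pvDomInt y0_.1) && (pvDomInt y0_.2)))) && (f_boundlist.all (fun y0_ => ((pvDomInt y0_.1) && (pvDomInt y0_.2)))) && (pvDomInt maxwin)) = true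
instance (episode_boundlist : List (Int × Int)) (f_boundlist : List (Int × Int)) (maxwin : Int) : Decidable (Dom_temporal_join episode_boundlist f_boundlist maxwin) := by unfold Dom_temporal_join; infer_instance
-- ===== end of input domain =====

-- B pre-sorts the f start-timestamps once and binary-searches the contiguous
-- (te_i, ts_i+maxwin-1] range per episode instead of scanning all of f for every episode (alternative).

-- ===== PORT A =====
def temporal_join (episode_boundlist : List (Int × Int)) (f_boundlist : List (Int × Int)) (maxwin : Int) : List (Int × Int) :=
  episode_boundlist.foldl (fun new_boundlist p =>
    let window_end := p.1 + maxwin - 1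
    f_boundlist.foldl (fun acc q =>
      if p.2 < q.1 ∧ q.1 ≤ window_end then acc ++ [(p.1, q.1)] else acc) new_boundlist) []

-- ===== PORT B =====
-- _upper_bound: lo, hi are nonnegative Python ints (Nat is exact); a[mid] has 0 ≤ mid < len(a)
-- whenever evaluated with hi ≤ len(a), so List.getD is exact there.
def ubAux (a : List Int) (x : Int) (lo hi : Nat) : Nat :=
  if lo < hi then
    let mid := (lo + hi) / 2
    if a.getD mid 0 ≤ x then ubAux a x (mid + 1) hi
    else ubAux a x lo mid
  else lo
termination_by hi - lo
decreasing_by all_goals omega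

def temporal_join_alt (episode_boundlist : List (Int × Int)) (f_boundlist : List (Int × Int)) (maxwin : Int) : List (Int × Int) :=
  let tagged := PySem.List.sorted ((PySem.List.enumerate f_boundlist 0).map (fun p => (p.2.1, p.1))) (fun p => p.1) false
  let keys := tagged.map (fun p => p.1)
  episode_boundlist.foldl (fun out p =>
    let lo := ubAux keys p.2 0 keys.length
    let hi := ubAux keys (p.1 + maxwin - 1) 0 keys.length
    (PySem.List.sorted (PySem.List.slice tagged (some (lo : Int)) (some (hi : Int))) (fun q => q.2) false).foldl
      (fun acc q => acc ++ [(p.1, q.1)]) out) []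

-- ===== PRECONDITION & SPEC =====
def Spec_temporal_join (episode_boundlist : List (Int × Int)) (f_boundlist : List (Int × Int)) (maxwin : Int) (out : List (Int × Int)) : Prop := out = temporal_join_alt episode_boundlist f_boundlist maxwin
instance (episode_boundlist : List (Int × Int)) (f_boundlist : List (Int × Int)) (maxwin : Int) (out : List (Int × Int)) : Decidable (Spec_temporal_join episode_boundlist f_boundlist maxwin out) := by unfold Spec_temporal_join; infer_instance

-- ===== CLAIM (what is proved, stated in full; the proofs are below) =====
def Claim_equal_temporal_join : Prop := ∀ (episode_boundlist : List (Int × Int)) (f_boundlist : List (Int × Int)) (maxwin : Int), Dom_temporal_join episode_boundlist f_boundlist maxwin → Spec_temporal_join episode_boundlist f_boundlist maxwin (temporal_join episode_boundlist f_boundlist maxwin)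

-- ===== LEMMAS AND PROOFS =====

-- binary-search invariant: on a sorted list, ubAux returns the boundary between ≤ x and > x
lemma ubAux_spec (a : List Int) (x : Int) (hs : a.Pairwise (· ≤ ·)) :
    ∀ fuel lo hi, hi - lo ≤ fuel → lo ≤ hi → hi ≤ a.length →
    (∀ i, i < lo → ∀ (h : i < a.length), a[i] ≤ x) →
    (∀ i, hi ≤ i → ∀ (h : i < a.length), x < a[i]) →
    lo ≤ ubAux a x lo hi ∧ ubAux a x lo hi ≤ hi ∧
    (∀ i, i < ubAux a x lo hi → ∀ (h : i < a.length), a[i] ≤ x) ∧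
    (∀ i, ubAux a x lo hi ≤ i → ∀ (h : i < a.length), x < a[i]) := by
  have hmono : ∀ (i j : Nat) (hj : j < a.length) (hij : i ≤ j), a[i]'(by omega) ≤ a[j] := by
    intro i j hj hij
    rcases Nat.lt_or_ge i j with h | h
    · exact (List.pairwise_iff_getElem.mp hs) i j (by omega) hj h
    · have : i = j := by omega
      subst this; exact le_refl _
  intro fuel
  induction fuel with
  | zero =>
    intro lo hi hf hlh hha hlow hhigh
    have he : ¬ lo < hi := by omega
    rw [ubAux]; simp only [he, if_false]
    exact ⟨le_refl _, hlh, hlow, fun i hi' h => hhigh i (by omega) h⟩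
  | succ n ih =>
    intro lo hi hf hlh hha hlow hhigh
    rw [ubAux]
    by_cases h : lo < hi
    · simp only [h, if_true]
      have hmid1 : lo ≤ (lo + hi) / 2 := by omega
      have hmid2 : (lo + hi) / 2 < hi := by omega
      have hmlen : (lo + hi) / 2 < a.length := by omega
      have hget : a.getD ((lo + hi) / 2) 0 = a[(lo + hi) / 2] := List.getD_eq_getElem a 0 hmlen
      by_cases hc : a.getD ((lo + hi) / 2) 0 ≤ x
      · simp only [hc, if_true]
        have hlow' : ∀ i, i < (lo + hi) / 2 + 1 → ∀ (hh : i < a.length), a[i] ≤ x := by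
          intro i hi' hh
          exact le_trans (hmono i ((lo + hi) / 2) hmlen (by omega)) (hget ▸ hc)
        have := ih ((lo + hi) / 2 + 1) hi (by omega) (by omega) hha hlow' hhigh
        exact ⟨by omega, this.2.1, this.2.2.1, this.2.2.2⟩
      · simp only [hc, if_false]
        have hx : x < a[(lo + hi) / 2] := by rw [← hget]; omega
        have hhigh' : ∀ i, (lo + hi) / 2 ≤ i → ∀ (hh : i < a.length), x < a[i] := by
          intro i hi' hh
          exact lt_of_lt_of_le hx (hmono ((lo + hi) / 2) i hh hi')
        have := ih lo ((lo + hi) / 2) (by omega) (by omega) (by omega) hlow hhigh'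
        exact ⟨this.1, by omega, this.2.2.1, this.2.2.2⟩
    · simp only [h, if_false]
      exact ⟨le_refl _, hlh, hlow, fun i hi' hh => hhigh i (by omega) hh⟩

lemma ubAux_mem_iff (a : List Int) (x : Int) (hs : a.Pairwise (· ≤ ·))
    (p : Nat) (hp : p < a.length) :
    p < ubAux a x 0 a.length ↔ a[p] ≤ x := by
  have hsp := ubAux_spec a x hs a.length 0 a.length (by omega) (by omega) (le_refl _)
    (by intro i hi; omega) (by intro i hi hh; omega)
  constructor
  · intro h; exact hsp.2.2.1 p h hp
  · intro h
    by_contra hnot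
    exact absurd h (not_le.mpr (hsp.2.2.2 p (by omega) hp))

-- the central per-episode lemma: the sorted slice is exactly the filter of the tagged list
lemma sorted_slice_eq (f : List (Int × Int)) (te w : Int)
    (L tg : List (Int × Int)) (keys : List Int) (klo khi : Nat)
    (hL : L = (PySem.List.enumerate f 0).map (fun p => (p.2.1, p.1)))
    (htg : tg = PySem.List.sorted L (fun p => p.1) false)
    (hkeys : keys = tg.map (fun p => p.1))
    (hklo : klo = ubAux keys te 0 keys.length)
    (hkhi : khi = ubAux keys w 0 keys.length) :
    PySem.List.sorted (PySem.List.slice tg (some (klo : Int)) (some (khi : Int))) (fun q => q.2) false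
      = L.filter (fun q => decide (te < q.1 ∧ q.1 ≤ w)) := by
  -- sortedness of the key list
  have hkpw : keys.Pairwise (· ≤ ·) := by
    rw [hkeys, htg]
    exact PySem.List.sorted_map_key_pairwise L (fun p => p.1)
  have hklen : keys.length = tg.length := by rw [hkeys]; exact List.length_map ..
  have hkey_get : ∀ (p : Nat) (hp : p < keys.length), keys[p] = (tg[p]'(by omega)).1 := by
    intro p hp
    subst hkeys; simp
  -- pairwise/nodup facts
  have hLpw : L.Pairwise (fun a b => a.2 < b.2) := by
    rw [hL, List.pairwise_map]
    simpa using PySem.List.pairwise_lt_enumerate f 0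
  have hLnd : L.Nodup := hLpw.imp (fun {a b} h he => by subst he; exact lt_irrefl _ h)
  have htgperm : tg.Perm L := by rw [htg]; exact PySem.List.sorted_perm ..
  have htgnd : tg.Nodup := htgperm.nodup_iff.mpr hLnd
  have hmem_tg : ∀ q, q ∈ tg ↔ q ∈ L := fun q => htgperm.mem_iff
  -- upper-bound characterisations
  have hte : ∀ (p : Nat) (hp : p < keys.length), p < klo ↔ keys[p] ≤ te := by
    intro p hp; rw [hklo]; exact ubAux_mem_iff keys te hkpw p hp
  have hwc : ∀ (p : Nat) (hp : p < keys.length), p < khi ↔ keys[p] ≤ w := by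
    intro p hp; rw [hkhi]; exact ubAux_mem_iff keys w hkpw p hp
  have hkhi_le : khi ≤ keys.length := by
    rw [hkhi]
    exact (ubAux_spec keys w hkpw keys.length 0 keys.length (by omega) (by omega) (le_refl _)
      (by intro i hi; omega) (by intro i hi hh; omega)).2.1
  -- the slice
  have hsl : PySem.List.slice tg (some (klo : Int)) (some (khi : Int)) = (tg.drop klo).take (khi - klo) :=
    PySem.List.slice_natCast ..
  set sl := PySem.List.slice tg (some (klo : Int)) (some (khi : Int)) with hsldef
  have hslsub : sl.Sublist tg := by
    rw [hsl]; exact (List.take_sublist ..).trans (List.drop_sublist ..)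
  have hslnd : sl.Nodup := hslsub.nodup htgnd
  have hsllen : sl.length = min (khi - klo) (tg.length - klo) := by
    rw [hsl]; simp
  have hsl_get : ∀ (i : Nat) (hi : i < sl.length), sl[i] = tg[klo + i]'(by omega) := by
    intro i hi
    have hi' : i < ((tg.drop klo).take (khi - klo)).length := by rw [← hsl]; exact hi
    calc sl[i] = ((tg.drop klo).take (khi - klo))[i]'hi' := by simp only [hsl]
    _ = (tg.drop klo)[i]'(by simp at hi' ⊢; omega) := List.getElem_take ..
    _ = tg[klo + i]'(by simp at hi' ⊢; omega) := List.getElem_drop ..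
  have hmem_sl : ∀ q, q ∈ sl ↔ (q ∈ tg ∧ te < q.1 ∧ q.1 ≤ w) := by
    intro q
    constructor
    · intro hq
      obtain ⟨i, hi, hqe⟩ := List.mem_iff_getElem.mp hq
      have hqe' : q = tg[klo + i]'(by rw [hsllen] at hi; omega) := by rw [← hqe, hsl_get i hi]
      have hlt : klo + i < tg.length := by rw [hsllen] at hi; omega
      have hltk : klo + i < keys.length := by omega
      have h1 : ¬ (klo + i < klo) := by omega
      have h2 : klo + i < khi := by rw [hsllen] at hi; omega
      refine ⟨hqe' ▸ List.getElem_mem _, ?_, ?_⟩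
      · have := (hte (klo + i) hltk).not.mp (by omega)
        rw [hkey_get (klo + i) hltk, ← hqe'] at this
        omega
      · have := (hwc (klo + i) hltk).mp h2
        rw [hkey_get (klo + i) hltk, ← hqe'] at this
        exact this
    · rintro ⟨hq, hb1, hb2⟩
      obtain ⟨p, hp, hqe⟩ := List.mem_iff_getElem.mp hq
      have hpk : p < keys.length := by omega
      have hplo : ¬ p < klo := by
        intro hlt
        have := (hte p hpk).mp hlt
        rw [hkey_get p hpk, hqe] at this
        omega
      have hphi : p < khi := by
        apply (hwc p hpk).mpr
        rw [hkey_get p hpk, hqe]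
        exact hb2
      have hidx : p - klo < sl.length := by rw [hsllen]; omega
      have : sl[p - klo]'hidx = q := by
        rw [hsl_get (p - klo) hidx, ← hqe]
        congr 1
        omega
      exact this ▸ List.getElem_mem _
  -- the filtered list
  set T := L.filter (fun q => decide (te < q.1 ∧ q.1 ≤ w)) with hT
  have hTnd : T.Nodup := (List.filter_sublist).nodup hLnd
  have hTpw : T.Pairwise (fun a b => a.2 < b.2) := hLpw.sublist List.filter_sublist
  have hperm : T.Perm sl := by
    apply (List.perm_ext_iff_of_nodup hTnd hslnd).mpr
    intro q
    rw [hmem_sl q, hT, List.mem_filter, decide_eq_true_iff, hmem_tg q]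
  exact PySem.List.sorted_eq_of_perm_of_pairwise_lt sl T (fun q => q.2) hperm hTpw

-- the tagged-and-filtered list projects back to A's filter over f itself
lemma filter_map_eq (f : List (Int × Int)) (ts te w : Int) :
    (((PySem.List.enumerate f 0).map (fun p => (p.2.1, p.1))).filter
        (fun q => decide (te < q.1 ∧ q.1 ≤ w))).map (fun q => (ts, q.1))
    = (f.filter (fun q => decide (te < q.1 ∧ q.1 ≤ w))).map (fun q => (ts, q.1)) := by
  rw [List.filter_map, List.map_map]
  conv_rhs => rw [← PySem.List.map_snd_enumerate f 0, List.filter_map, List.map_map]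
  rfl

-- ===== VERDICT (by name: the statement is the Claim_ definition above) =====
theorem temporal_join_spec : Claim_equal_temporal_join := by
  intro e f m _hd
  unfold Spec_temporal_join
  simp only [temporal_join, temporal_join_alt]
  apply PySem.List.foldl_congr_mem
  intro acc p hp
  rw [PySem.List.foldl_append_ite (p := fun q : Int × Int => p.2 < q.1 ∧ q.1 ≤ p.1 + m - 1)
        (f := fun q : Int × Int => (p.1, q.1)) (l := f) (acc := acc),
      PySem.List.foldl_append_singleton_eq_map,
      sorted_slice_eq f p.2 (p.1 + m - 1) _ _ _ _ _ rfl rfl rfl rfl rfl,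
      filter_map_eq f p.1 p.2 (p.1 + m - 1)]
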